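-- pv_equiv track=rewrite | github.com/emorynlp/seq2seq-corenlp | elit/components/seq2seq/dep/dep_utility.py | build_relative_ids
-- ===== SOURCE A (Python) =====
-- from collections import Counter, defaultdict
--
-- def build_relative_ids(tokens):
--     relative_vocab = Counter()
--     relative_ids = []
--     for t in tokens:
--         relative_vocab[t] += 1
--         relative_ids.append(relative_vocab[t])
--     for i, t in enumerate(tokens):
--         if relative_vocab[t] == 1:
--             relative_ids[i] = None
--     return relative_ids
-- ===== SOURCE B (Python) =====
-- def build_relative_ids(tokens):
--     positions = {}
--     for i, t in enumerate(tokens):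
--         positions.setdefault(t, []).append(i)
--     result = [None] * len(tokens)
--     for idxs in positions.values():
--         if len(idxs) > 1:
--             for k, i in enumerate(idxs, 1):
--                 result[i] = k
--     return result
-- ===== Notes on version B (the rewrite author's own statement) =====
-- stated objective: alternative
-- what changed: B groups occurrence positions per token into an index dict in one pass and then fills a preallocated None array group by group with 1-based ranks (singleton groups left untouched), instead of A's append-running-counts-then-patch-singletons two passes over the token list.
import Mathlib
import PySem

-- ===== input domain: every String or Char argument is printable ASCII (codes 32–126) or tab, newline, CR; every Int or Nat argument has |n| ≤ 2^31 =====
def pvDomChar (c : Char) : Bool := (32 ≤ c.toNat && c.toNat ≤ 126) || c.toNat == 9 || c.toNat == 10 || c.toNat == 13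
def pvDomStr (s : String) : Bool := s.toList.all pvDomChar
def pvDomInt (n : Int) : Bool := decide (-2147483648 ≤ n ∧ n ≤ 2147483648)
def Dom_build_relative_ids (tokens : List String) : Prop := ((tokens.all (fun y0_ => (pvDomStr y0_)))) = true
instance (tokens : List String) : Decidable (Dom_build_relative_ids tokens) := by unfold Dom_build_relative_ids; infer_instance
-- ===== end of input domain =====

-- B groups occurrence positions per token into an index dict, then fills a preallocated None
-- array group by group with 1-based ranks (singleton groups untouched), instead of A's
-- append-running-counts-then-patch-singletons; objective: alternative decomposition.

-- ===== PORT A =====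
def build_relative_ids (tokens : List String) : List (Option Int) :=
  let st := tokens.foldl
    (fun (p : PySem.Dict String Int × List (Option Int)) t =>
      let d := p.1.modify t 0 (· + 1)
      (d, p.2 ++ [some (d.getD t 0)]))
    ((PySem.Dict.empty : PySem.Dict String Int), [])
  (PySem.List.enumerate tokens 0).foldl
    (fun ids p => if st.1.getD p.2 0 == 1 then PySem.List.pySetD ids p.1 none else ids)
    st.2

-- ===== PORT B =====
def build_relative_ids_alt (tokens : List String) : List (Option Int) :=
  let positions := (PySem.List.enumerate tokens 0).foldl
    (fun (d : PySem.Dict String (List Int)) p => d.modify p.2 [] (· ++ [p.1]))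
    (PySem.Dict.empty : PySem.Dict String (List Int))
  let result := List.replicate tokens.length (none : Option Int)
  positions.values.foldl
    (fun res idxs =>
      if 1 < idxs.length then
        (PySem.List.enumerate idxs 1).foldl (fun r q => PySem.List.pySetD r q.2 (some q.1)) res
      else res)
    result

-- ===== PRECONDITION & SPEC =====
def Spec_build_relative_ids (tokens : List String) (out : List (Option Int)) : Prop := out = build_relative_ids_alt tokens
instance (tokens : List String) (out : List (Option Int)) : Decidable (Spec_build_relative_ids tokens out) := by unfold Spec_build_relative_ids; infer_instance

-- ===== CLAIM (what is proved, stated in full; the proofs are below) =====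
def Claim_equal_build_relative_ids : Prop := ∀ (tokens : List String), Dom_build_relative_ids tokens → Spec_build_relative_ids tokens (build_relative_ids tokens)

-- ===== LEMMAS AND PROOFS =====

-- the list built by A's first loop, as a structural recursion
def pvRunA (d : PySem.Dict String Int) : List String → List (Option Int)
  | [] => []
  | t :: ts =>
    let d' := d.modify t 0 (· + 1)
    some (d'.getD t 0) :: pvRunA d' ts

-- A's final list (after the patch loop), as a structural recursion over the tokens
def pvRunB (T d : PySem.Dict String Int) : List String → List (Option Int)
  | [] => []
  | t :: ts =>
    let d' := d.modify t 0 (· + 1)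
    (if T.getD t 0 == 1 then none else some (d'.getD t 0)) :: pvRunB T d' ts

theorem pvRunA_length (d : PySem.Dict String Int) (xs : List String) :
    (pvRunA d xs).length = xs.length := by
  induction xs generalizing d with
  | nil => rfl
  | cons t ts ih => simp [pvRunA, ih]

theorem pvRunB_length (T d : PySem.Dict String Int) (xs : List String) :
    (pvRunB T d xs).length = xs.length := by
  induction xs generalizing d with
  | nil => rfl
  | cons t ts ih => simp [pvRunB, ih]

theorem pvFoldA (xs : List String) (d : PySem.Dict String Int) (acc : List (Option Int)) :
    xs.foldl
      (fun (p : PySem.Dict String Int × List (Option Int)) t =>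
        let d := p.1.modify t 0 (· + 1)
        (d, p.2 ++ [some (d.getD t 0)])) (d, acc)
      = (xs.foldl (fun d t => d.modify t 0 (· + 1)) d, acc ++ pvRunA d xs) := by
  induction xs generalizing d acc with
  | nil => simp [pvRunA]
  | cons t ts ih =>
    simp only [List.foldl]
    rw [ih]
    simp [pvRunA]

theorem pvPatch (T : PySem.Dict String Int) (xs : List String) (ids0 ids : List (Option Int))
    (h : ids.length = xs.length) (s : Int) (hs : s = ids0.length) :
    (PySem.List.enumerate xs s).foldl
      (fun l (p : Int × String) => if T.getD p.2 0 == 1 then PySem.List.pySetD l p.1 none else l)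
      (ids0 ++ ids)
      = ids0 ++ (xs.zip ids).map (fun p => if T.getD p.1 0 == 1 then none else p.2) := by
  induction xs generalizing ids0 ids s with
  | nil =>
    have : ids = [] := List.eq_nil_of_length_eq_zero h
    simp [this, PySem.List.enumerate]
  | cons t ts ih =>
    cases ids with
    | nil => simp at h
    | cons v ids' =>
      rw [PySem.List.enumerate_cons]
      simp only [List.foldl]
      by_cases hc : T.getD t 0 == 1
      · have hset : PySem.List.pySetD (ids0 ++ v :: ids') s (none : Option Int)
            = (ids0 ++ [(none : Option Int)]) ++ ids' := by
          subst hs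
          rw [show ((ids0.length : Int)) = ((ids0.length : Nat) : Int) by simp,
            PySem.List.pySetD_natCast]
          rw [List.set_append_right _ _ (Nat.le_refl _)]
          simp
        have hc' : T.getD t 0 = 1 := by simpa using hc
        rw [if_pos hc, hset,
          ih (ids0 ++ [(none : Option Int)]) ids' (by simpa using h) (s + 1) (by simp [hs])]
        simp [List.zip, hc']
      · rw [if_neg hc,
          show ids0 ++ v :: ids' = (ids0 ++ [v]) ++ ids' by simp]
        have hc' : ¬ T.getD t 0 = 1 := by simpa using hc
        rw [ih (ids0 ++ [v]) ids' (by simpa using h) (s + 1) (by simp [hs])]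
        simp [List.zip, hc']

theorem pvZip (T : PySem.Dict String Int) (xs : List String) (d : PySem.Dict String Int) :
    (xs.zip (pvRunA d xs)).map (fun p => if T.getD p.1 0 == 1 then none else p.2)
      = pvRunB T d xs := by
  induction xs generalizing d with
  | nil => rfl
  | cons t ts ih =>
    simp only [pvRunA, pvRunB, List.zip_cons_cons, List.map_cons]
    exact congrArg _ (ih _)

theorem pvPatch0 (T : PySem.Dict String Int) (xs : List String) (ids : List (Option Int))
    (h : ids.length = xs.length) :
    (PySem.List.enumerate xs 0).foldl
      (fun l (p : Int × String) => if T.getD p.2 0 == 1 then PySem.List.pySetD l p.1 none else l)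
      ids
      = (xs.zip ids).map (fun p => if T.getD p.1 0 == 1 then none else p.2) := by
  simpa using pvPatch T xs [] ids h 0 (by simp)

-- A's result is pvRunB over the full counter
theorem pvA_eq_pvRunB (tokens : List String) :
    build_relative_ids tokens = pvRunB (PySem.Dict.counter tokens) PySem.Dict.empty tokens := by
  unfold build_relative_ids
  simp only [pvFoldA, List.nil_append]
  rw [← PySem.Dict.counter_eq_foldl]
  rw [pvPatch0 (PySem.Dict.counter tokens) tokens (pvRunA PySem.Dict.empty tokens)
    (pvRunA_length _ _)]
  exact pvZip _ _ _

-- elementwise characterisation of A's result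
theorem pvRunB_getElem (T : PySem.Dict String Int) (xs : List String)
    (d : PySem.Dict String Int) (i : Nat) (h : i < xs.length) :
    (pvRunB T d xs)[i]'(by rw [pvRunB_length]; exact h)
      = if T.getD xs[i] 0 = 1 then none
        else some (d.getD xs[i] 0 + ((xs.take (i + 1)).count xs[i] : Int)) := by
  induction xs generalizing d i with
  | nil => simp at h
  | cons t ts ih =>
    cases i with
    | zero =>
      simp [pvRunB, PySem.Dict.getD_modify_self, beq_iff_eq]
    | succ i =>
      have h' : i < ts.length := by simpa using h
      show (pvRunB T (d.modify t 0 (· + 1)) ts)[i]'(by rw [pvRunB_length]; exact h') = _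
      rw [ih _ _ h']
      have hget : (t :: ts)[i + 1] = ts[i] := by simp
      rw [PySem.Dict.getD_modify]
      by_cases he : ts[i] = t
      · simp [hget, he]
        split_ifs with h1
        · rfl
        · ring_nf
      · simp [hget, he, Ne.symm he]

-- ===== B-side helpers =====

-- the occurrence-position list B's dict stores for token t (enumerate start generalised)
def pvGrp (t : String) (xs : List String) (s : Int) : List Int :=
  ((PySem.List.enumerate xs s).filter (fun p => p.2 == t)).map (·.1)

-- B's inner fill loop
def pvFill (res : List (Option Int)) (g : List Int) (s : Int) : List (Option Int) :=
  (PySem.List.enumerate g s).foldl (fun r q => PySem.List.pySetD r q.2 (some q.1)) res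

-- B's outer loop over the dict's values
def pvOuterFold (vals : List (List Int)) (res : List (Option Int)) : List (Option Int) :=
  vals.foldl (fun res idxs => if 1 < idxs.length then pvFill res idxs 1 else res) res

theorem pvGrp_cons (t u : String) (us : List String) (s : Int) :
    pvGrp t (u :: us) s = if u = t then s :: pvGrp t us (s+1) else pvGrp t us (s+1) := by
  simp only [pvGrp, PySem.List.enumerate_cons, List.filter_cons]
  by_cases h : u = t <;> simp [h]

theorem pvGrp_ge (t : String) (xs : List String) (s : Int) :
    ∀ x ∈ pvGrp t xs s, s ≤ x := by
  induction xs generalizing s with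
  | nil => simp [pvGrp, PySem.List.enumerate]
  | cons u us ih =>
    intro x hx
    rw [pvGrp_cons] at hx
    split_ifs at hx with h
    · rcases List.mem_cons.1 hx with rfl | hx
      · exact le_refl _
      · exact le_trans (by omega) (ih (s+1) x hx)
    · exact le_trans (by omega) (ih (s+1) x hx)

theorem pvGrp_nodup (t : String) (xs : List String) (s : Int) :
    (pvGrp t xs s).Nodup := by
  induction xs generalizing s with
  | nil => simp [pvGrp, PySem.List.enumerate]
  | cons u us ih =>
    rw [pvGrp_cons]
    split_ifs with h
    · refine List.Nodup.cons (fun hmem => ?_) (ih (s+1))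
      have := pvGrp_ge t us (s+1) s hmem
      omega
    · exact ih (s+1)

theorem pvGrp_length (t : String) (xs : List String) (s : Int) :
    (pvGrp t xs s).length = xs.count t := by
  induction xs generalizing s with
  | nil => simp [pvGrp, PySem.List.enumerate]
  | cons u us ih =>
    by_cases h : u = t
    · subst h; simp [pvGrp_cons, ih]
    · simp [pvGrp_cons, h, ih]

theorem pvGrp_mem (t : String) (xs : List String) (s : Int) (j : Nat) (hj : j < xs.length) :
    ((s + (j : Int)) ∈ pvGrp t xs s) ↔ xs[j] = t := by
  induction xs generalizing s j with
  | nil => simp at hj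
  | cons u us ih =>
    rw [pvGrp_cons]
    cases j with
    | zero =>
      simp only [List.getElem_cons_zero]
      split_ifs with h
      · simp [h]
      · constructor
        · intro hmem
          have := pvGrp_ge t us (s+1) _ (by simpa using hmem)
          omega
        · intro hc; exact absurd hc h
    | succ j =>
      have hj' : j < us.length := by simpa using hj
      have : s + ((j : Int) + 1) = (s + 1) + (j : Int) := by ring
      split_ifs with h
      · rw [List.mem_cons]
        push_cast
        rw [this]
        have hne : ¬ (s + 1 + (j:Int) = s) := by omega
        simp only [List.getElem_cons_succ]
        rw [ih (s+1) j hj']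
        constructor
        · rintro (hc | hc)
          · omega
          · exact hc
        · intro hc; exact Or.inr hc
      · push_cast
        rw [this, ih (s+1) j hj']
        simp

theorem pvGrp_idxOf (t : String) (xs : List String) (s : Int) (j : Nat) (hj : j < xs.length)
    (ht : xs[j] = t) : (pvGrp t xs s).idxOf (s + (j : Int)) = (xs.take j).count t := by
  induction xs generalizing s j with
  | nil => simp at hj
  | cons u us ih =>
    rw [pvGrp_cons]
    cases j with
    | zero =>
      have : u = t := by simpa using ht
      simp [this]
    | succ j =>
      have hj' : j < us.length := by simpa using hj
      have ht' : us[j] = t := by simpa using ht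
      have harith : s + ((j:Int) + 1) = (s + 1) + (j : Int) := by ring
      split_ifs with h
      · have hne : s ≠ s + 1 + (j:Int) := by omega
        push_cast
        rw [harith]
        rw [List.idxOf_cons_ne _ hne, ih (s+1) j hj' ht']
        simp [h]
      · push_cast
        rw [harith, ih (s+1) j hj' ht']
        simp [h]

theorem pvFill_cons (res : List (Option Int)) (x : Int) (g : List Int) (s : Int) :
    pvFill res (x :: g) s = pvFill (PySem.List.pySetD res x (some s)) g (s + 1) := by
  simp [pvFill, PySem.List.enumerate_cons]

theorem pvFill_length (res : List (Option Int)) (g : List Int) (s : Int) :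
    (pvFill res g s).length = res.length := by
  induction g generalizing res s with
  | nil => simp [pvFill, PySem.List.enumerate]
  | cons x g ih => rw [pvFill_cons, ih]; simp [PySem.List.length_pySetD]

theorem pvFill_getElem (g : List Int) (hnd : g.Nodup) (hnn : ∀ x ∈ g, 0 ≤ x)
    (res : List (Option Int)) (s : Int) (j : Nat) (hj : j < res.length) :
    (pvFill res g s)[j]'(by rw [pvFill_length]; exact hj)
      = if (j : Int) ∈ g then some (s + (g.idxOf (j : Int) : Int)) else res[j] := by
  induction g generalizing res s with
  | nil => simp [pvFill, PySem.List.enumerate]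
  | cons x g ih =>
    simp only [pvFill_cons]
    have hj' : j < (PySem.List.pySetD res x (some s)).length := by
      rw [PySem.List.length_pySetD]; exact hj
    rw [ih hnd.of_cons (fun y hy => hnn y (List.mem_cons_of_mem _ hy)) _ (s+1) hj']
    by_cases hmem : (j : Int) ∈ g
    · have hxj : x ≠ (j : Int) := fun he => (List.nodup_cons.mp hnd).1 (he ▸ hmem)
      rw [if_pos hmem, if_pos (List.mem_cons_of_mem _ hmem)]
      rw [List.idxOf_cons_ne _ hxj]
      push_cast
      ring_nf
    · rw [if_neg hmem]
      by_cases hx : x = (j : Int)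
      · subst hx
        rw [if_pos (List.mem_cons_self)]
        rw [List.idxOf_cons_self]
        simp [PySem.List.pySetD_natCast]
      · have hnm : ¬ (j : Int) ∈ (x :: g) := by
          intro hc; rcases List.mem_cons.1 hc with hc | hc
          · exact hx hc.symm
          · exact hmem hc
        rw [if_neg hnm]
        have h0x : 0 ≤ x := hnn x List.mem_cons_self
        have hne : x.toNat ≠ j := by omega
        simp [PySem.List.pySetD_of_nonneg _ _ h0x, List.getElem_set_ne hne]

theorem pvOuterFold_length (vals : List (List Int)) (res : List (Option Int)) :
    (pvOuterFold vals res).length = res.length := by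
  induction vals generalizing res with
  | nil => rfl
  | cons g gs ih =>
    have h : pvOuterFold (g :: gs) res
        = pvOuterFold gs (if 1 < g.length then pvFill res g 1 else res) := rfl
    rw [h, ih]
    split_ifs with hl
    · exact pvFill_length res g 1
    · rfl

theorem pvOuterFold_getElem? (j : Nat) (g0 : List Int) (vals : List (List Int))
    (hnn : ∀ g ∈ vals, ∀ x ∈ g, 0 ≤ x) (hnds : ∀ g ∈ vals, g.Nodup)
    (hu : ∀ g ∈ vals, (j : Int) ∈ g → g = g0)
    (res : List (Option Int)) (hj : j < res.length) :
    (pvOuterFold vals res)[j]?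
      = some (if (∃ g ∈ vals, (j : Int) ∈ g) ∧ 1 < g0.length
          then some (1 + (g0.idxOf (j : Int) : Int)) else res[j]) := by
  induction vals generalizing res with
  | nil =>
    simp only [pvOuterFold, List.foldl_nil]
    rw [List.getElem?_eq_getElem hj]
    simp
  | cons g gs ih =>
    have hstep : pvOuterFold (g :: gs) res
        = pvOuterFold gs (if 1 < g.length then pvFill res g 1 else res) := rfl
    have hlen1 : (if 1 < g.length then pvFill res g 1 else res).length = res.length := by
      split_ifs with h
      · exact pvFill_length res g 1
      · rfl
    have hj1 : j < (if 1 < g.length then pvFill res g 1 else res).length := by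
      rw [hlen1]; exact hj
    have ihx := ih (fun g' hg' => hnn g' (List.mem_cons_of_mem _ hg'))
      (fun g' hg' => hnds g' (List.mem_cons_of_mem _ hg'))
      (fun g' hg' => hu g' (List.mem_cons_of_mem _ hg')) _ hj1
    rw [hstep, ihx]
    by_cases hm : (j : Int) ∈ g
    · have hg0 : g = g0 := hu g List.mem_cons_self hm
      subst hg0
      have hres1 : (if 1 < g.length then pvFill res g 1 else res)[j]'hj1
          = if 1 < g.length then some (1 + (g.idxOf (j : Int) : Int)) else res[j] := by
        by_cases hl : 1 < g.length
        · simp only [hl, if_true]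
          rw [pvFill_getElem g (hnds g List.mem_cons_self)
            (hnn g List.mem_cons_self) res 1 j hj]
          rw [if_pos hm]
        · simp only [hl, if_false]
      have hex : (∃ g' ∈ g :: gs, (j : Int) ∈ g') := ⟨g, List.mem_cons_self, hm⟩
      rw [hres1]
      by_cases hl : 1 < g.length
      · simp only [hl, if_true, and_true]
        rw [if_pos hex]
        split_ifs <;> rfl
      · simp [hl]
    · have hres1 : (if 1 < g.length then pvFill res g 1 else res)[j]'hj1 = res[j] := by
        by_cases hl : 1 < g.length
        · simp only [hl, if_true]
          rw [pvFill_getElem g (hnds g List.mem_cons_self)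
            (hnn g List.mem_cons_self) res 1 j hj]
          rw [if_neg hm]
        · simp only [hl, if_false]
      have hex : (∃ g' ∈ g :: gs, (j : Int) ∈ g') ↔ (∃ g' ∈ gs, (j : Int) ∈ g') := by
        constructor
        · rintro ⟨g', hg', hjg'⟩
          rcases List.mem_cons.1 hg' with rfl | hg'
          · exact absurd hjg' hm
          · exact ⟨g', hg', hjg'⟩
        · rintro ⟨g', hg', hjg'⟩; exact ⟨g', List.mem_cons_of_mem _ hg', hjg'⟩
      rw [hres1, if_congr (and_congr_left' hex) rfl rfl]

-- B's dict plumbing: the values list is the group of each distinct token, in first-occurrence order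
theorem pvDict_values (tokens : List String) :
    ((PySem.List.enumerate tokens 0).foldl
      (fun (d : PySem.Dict String (List Int)) p => d.modify p.2 [] (· ++ [p.1]))
      PySem.Dict.empty).values
    = (PySem.Set.ofList tokens).map (fun t => pvGrp t tokens 0) := by
  have hkeys : ((PySem.List.enumerate tokens 0).foldl
      (fun (d : PySem.Dict String (List Int)) p => d.modify p.2 [] (· ++ [p.1]))
      PySem.Dict.empty).keys = PySem.Set.ofList tokens := by
    have h := PySem.Dict.keys_foldl_modify_key (PySem.List.enumerate tokens 0)
      (fun p => p.2) ([] : List Int) (fun _ p v => v ++ [p.1]) PySem.Dict.empty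
    simpa [PySem.List.map_snd_enumerate, PySem.Dict.keys_empty] using h
  have hnd : ((PySem.List.enumerate tokens 0).foldl
      (fun (d : PySem.Dict String (List Int)) p => d.modify p.2 [] (· ++ [p.1]))
      PySem.Dict.empty).keys.Nodup := by
    exact PySem.Dict.nodup_keys_foldl_modify_key (PySem.List.enumerate tokens 0)
      (fun p => p.2) ([] : List Int) (fun _ p v => v ++ [p.1]) PySem.Dict.empty
      (by rw [PySem.Dict.keys_empty]; exact List.nodup_nil)
  have hget : ∀ t, ((PySem.List.enumerate tokens 0).foldl
      (fun (d : PySem.Dict String (List Int)) p => d.modify p.2 [] (· ++ [p.1]))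
      PySem.Dict.empty).getD t [] = pvGrp t tokens 0 := by
    intro t
    have h1 : (PySem.List.enumerate tokens 0).foldl
        (fun (d : PySem.Dict String (List Int)) p => d.modify p.2 [] (· ++ [p.1]))
        PySem.Dict.empty
        = ((PySem.List.enumerate tokens 0).map (fun p => (p.2, p.1))).foldl
          (fun d p => d.modify p.1 [] (· ++ [p.2])) PySem.Dict.empty := by
      rw [List.foldl_map]
    rw [h1, PySem.Dict.getD_foldl_modify_append, PySem.Dict.getD_empty, List.nil_append,
      List.filter_map, List.map_map]
    rfl
  rw [PySem.Dict.values_eq_map_keys _ hnd ([] : List Int), hkeys]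
  exact List.map_congr_left (fun t _ => hget t)

-- B's whole program, rephrased through the helpers (definitional)
theorem pvAlt_eq (tokens : List String) :
    build_relative_ids_alt tokens
      = pvOuterFold ((PySem.List.enumerate tokens 0).foldl
          (fun (d : PySem.Dict String (List Int)) p => d.modify p.2 [] (· ++ [p.1]))
          PySem.Dict.empty).values
        (List.replicate tokens.length none) := rfl

theorem pvCount_take_succ (tokens : List String) (j : Nat) (hj : j < tokens.length) :
    (tokens.take (j + 1)).count tokens[j] = (tokens.take j).count tokens[j] + 1 := by
  have h2 : tokens.take (j + 1) = tokens.take j ++ [tokens[j]] := by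
    rw [List.take_add_one, List.getElem?_eq_getElem hj]
    rfl
  rw [h2, List.count_append]
  simp

-- elementwise value of B's result
theorem pvAlt_getElem? (tokens : List String) (j : Nat) (hj : j < tokens.length) :
    (build_relative_ids_alt tokens)[j]?
      = some (if tokens.count tokens[j] = 1 then none
          else some (((tokens.take (j + 1)).count tokens[j] : Int))) := by
  have halt : build_relative_ids_alt tokens
      = pvOuterFold ((PySem.Set.ofList tokens).map (fun t => pvGrp t tokens 0))
          (List.replicate tokens.length none) := by
    rw [pvAlt_eq, pvDict_values]
  have hjr : j < (List.replicate tokens.length (none : Option Int)).length := by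
    simpa using hj
  have hmemtok : tokens[j] ∈ tokens := List.getElem_mem hj
  have hg0mem : (j : Int) ∈ pvGrp tokens[j] tokens 0 := by
    have := (pvGrp_mem tokens[j] tokens 0 j hj).2 rfl
    simpa using this
  have hchar := pvOuterFold_getElem? j (pvGrp tokens[j] tokens 0)
    ((PySem.Set.ofList tokens).map (fun t => pvGrp t tokens 0))
    (by
      intro g hg x hx
      rcases List.mem_map.1 hg with ⟨t, _, rfl⟩
      have := pvGrp_ge t tokens 0 x hx
      omega)
    (by
      intro g hg
      rcases List.mem_map.1 hg with ⟨t, _, rfl⟩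
      exact pvGrp_nodup t tokens 0)
    (by
      intro g hg hjg
      rcases List.mem_map.1 hg with ⟨t, _, rfl⟩
      have ht : tokens[j] = t := (pvGrp_mem t tokens 0 j hj).1 (by simpa using hjg)
      rw [← ht])
    (List.replicate tokens.length none) hjr
  have hex : (∃ g ∈ (PySem.Set.ofList tokens).map (fun t => pvGrp t tokens 0), (j : Int) ∈ g) := by
    refine ⟨pvGrp tokens[j] tokens 0, List.mem_map.2 ⟨tokens[j], ?_, rfl⟩, hg0mem⟩
    exact (PySem.Set.mem_ofList tokens tokens[j]).2 hmemtok
  have hlen : (pvGrp tokens[j] tokens 0).length = tokens.count tokens[j] :=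
    pvGrp_length tokens[j] tokens 0
  have hidx : (pvGrp tokens[j] tokens 0).idxOf (j : Int) = (tokens.take j).count tokens[j] := by
    have := pvGrp_idxOf tokens[j] tokens 0 j hj rfl
    simpa using this
  have hcpos : 0 < tokens.count tokens[j] := List.count_pos_iff.2 hmemtok
  rw [halt, hchar]
  congr 1
  by_cases hc : tokens.count tokens[j] = 1
  · rw [if_neg (by rw [hlen]; omega), if_pos hc]
    simp
  · rw [if_pos ⟨hex, by rw [hlen]; omega⟩, if_neg hc, hidx, pvCount_take_succ tokens j hj]
    push_cast
    ring_nf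
-- ===== VERDICT (by name: the statement is the Claim_ definition above) =====
theorem build_relative_ids_spec : Claim_equal_build_relative_ids := by
  intro tokens _
  unfold Spec_build_relative_ids
  apply List.ext_getElem?
  intro j
  by_cases hj : j < tokens.length
  · rw [pvAlt_getElem? tokens j hj, pvA_eq_pvRunB]
    rw [List.getElem?_eq_getElem (by rw [pvRunB_length]; exact hj : j < (pvRunB (PySem.Dict.counter tokens) PySem.Dict.empty tokens).length)]
    rw [pvRunB_getElem _ tokens _ j hj]
    rw [PySem.Dict.getD_counter, PySem.Dict.getD_empty]
    by_cases hc : tokens.count tokens[j] = 1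
    · simp [hc]
    · have hci : ¬ ((tokens.count tokens[j] : Int) = 1) := by exact_mod_cast hc
      simp [hc, hci]
  · have h1 : (build_relative_ids tokens).length ≤ j := by
      rw [pvA_eq_pvRunB, pvRunB_length]; omega
    have h2 : (build_relative_ids_alt tokens).length ≤ j := by
      rw [pvAlt_eq, pvOuterFold_length, List.length_replicate]; omega
    rw [List.getElem?_eq_none h1, List.getElem?_eq_none h2]
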